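-- pv_equiv track=rewrite | github.com/pypi-data/pypi-mirror-385 | packages/fynx/fynx-0.0.8-py3-none-any.whl/fynx/optimizer.py | _hom_sets_isomorphic
-- ===== SOURCE A (Python) =====
-- from collections import defaultdict, deque
-- from typing import (
--     Any,
--     Callable,
--     Deque,
--     Dict,
--     List,
--     Optional,
--     Set,
--     Tuple,
--     TypeVar,
--     Union,
-- )
--
-- def _hom_sets_isomorphic(hom1: Set[str], hom2: Set[str]) -> bool:
--     """
--     Check if two Hom-sets are isomorphic.
--
--     Two Hom-sets Hom(A,B) and Hom(A,C) are isomorphic if there's a bijection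
--     between them that preserves the categorical structure. For reactive graphs,
--     this means they have the same number and types of morphisms.
--     """
--     # Basic size check
--     if len(hom1) != len(hom2):
--         return False
--
--     # For identity-only sets, they're isomorphic
--     if hom1 == {"id"} and hom2 == {"id"}:
--         return True
--
--     # Classify morphisms by their computational structure
--     def classify_morphisms(hom_set: Set[str]) -> Dict[str, int]:
--         """Classify morphisms by their computational pattern."""
--         classification: Dict[str, int] = defaultdict(int)
--
--         for morphism in hom_set:
--             if morphism == "id":
--                 classification["identity"] += 1
--             elif morphism == "direct":
--                 classification["direct"] += 1
--             elif morphism.startswith("comp_"):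
--                 # Extract computation type
--                 parts = morphism.split("_")
--                 if len(parts) >= 2:
--                     comp_type = "_".join(parts[1:])  # Handle compound names
--                     classification[f"computed_{comp_type}"] += 1
--                 else:
--                     classification["computed_unknown"] += 1
--             else:
--                 # Complex composed morphism
--                 classification["composed"] += 1
--
--         return dict(classification)
--
--     # Compare classifications
--     class1 = classify_morphisms(hom1)
--     class2 = classify_morphisms(hom2)
--
--     return class1 == class2
-- ===== SOURCE B (Python) =====
-- def _hom_sets_isomorphic(hom1, hom2):
--     """Two hom-sets are isomorphic iff the multisets of pattern labels match."""
--     def classify(morphism):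
--         if morphism == "id":
--             return "identity"
--         if morphism == "direct":
--             return "direct"
--         if morphism.startswith("comp_"):
--             parts = morphism.split("_")
--             if len(parts) >= 2:
--                 return "computed_" + "_".join(parts[1:])
--             return "computed_unknown"
--         return "composed"
--
--     return sorted(classify(m) for m in hom1) == sorted(classify(m) for m in hom2)
-- ===== Notes on version B (the rewrite author's own statement) =====
-- stated objective: simpler
-- what changed: One classify(m) helper returns each morphism's pattern label and the function compares the two label multisets by sorting, replacing the count-dictionary construction plus the redundant length check and {'id'} special case.
import Mathlib
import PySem

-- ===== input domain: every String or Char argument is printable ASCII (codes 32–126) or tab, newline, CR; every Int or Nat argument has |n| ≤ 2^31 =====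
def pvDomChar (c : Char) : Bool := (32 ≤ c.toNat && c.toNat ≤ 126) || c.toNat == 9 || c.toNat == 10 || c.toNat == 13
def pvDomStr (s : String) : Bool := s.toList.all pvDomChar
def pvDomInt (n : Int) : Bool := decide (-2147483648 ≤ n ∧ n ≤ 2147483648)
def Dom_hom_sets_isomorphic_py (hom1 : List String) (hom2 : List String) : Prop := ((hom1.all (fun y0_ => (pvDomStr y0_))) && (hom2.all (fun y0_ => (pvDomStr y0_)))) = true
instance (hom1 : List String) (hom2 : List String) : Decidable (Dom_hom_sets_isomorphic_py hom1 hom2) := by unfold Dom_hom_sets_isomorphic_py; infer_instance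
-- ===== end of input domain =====

-- B replaces A's count-dictionary comparison (plus its redundant length check and {"id"} special case)
-- by one classify(m) helper and a comparison of the two sorted label lists; objective: simpler.
-- The Python arguments are sets; per the type convention each arrives as the list of its distinct elements.

-- ===== PORT A =====

-- Python dict equality (`class1 == class2`): same key set, same values — insertion order ignored.
def pvPyDictEq (d1 d2 : PySem.Dict String Int) : Bool :=
  d1.size == d2.size && d1.items.all (fun p => d2.get? p.1 == some p.2)

-- the inner `classify_morphisms`: one `for` loop incrementing a defaultdict(int)
def pvClassifyMorphisms (homSet : List String) : PySem.Dict String Int :=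
  homSet.foldl (fun classification morphism =>
    if morphism == "id" then
      classification.modify "identity" 0 (· + 1)
    else if morphism == "direct" then
      classification.modify "direct" 0 (· + 1)
    else if PySem.Str.startswith morphism "comp_" then
      -- morphism.split("_"); the separator is the nonempty literal "_", so split? is `some`
      let parts := (PySem.Str.split? morphism "_").getD []
      if parts.length ≥ 2 then
        classification.modify ("computed_" ++ PySem.Str.join "_" (PySem.List.slice parts (some 1) none)) 0 (· + 1)
      else
        classification.modify "computed_unknown" 0 (· + 1)
    else
      classification.modify "composed" 0 (· + 1)) PySem.Dict.empty

def hom_sets_isomorphic_py (hom1 : List String) (hom2 : List String) : Bool :=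
  if hom1.length ≠ hom2.length then false
  else if PySem.Set.equal hom1 ["id"] && PySem.Set.equal hom2 ["id"] then true
  else pvPyDictEq (pvClassifyMorphisms hom1) (pvClassifyMorphisms hom2)

-- ===== PORT B =====

def pvClassify (morphism : String) : String :=
  if morphism == "id" then "identity"
  else if morphism == "direct" then "direct"
  else if PySem.Str.startswith morphism "comp_" then
    -- morphism.split("_"); the separator is the nonempty literal "_", so split? is `some`
    let parts := (PySem.Str.split? morphism "_").getD []
    if parts.length ≥ 2 then "computed_" ++ PySem.Str.join "_" (PySem.List.slice parts (some 1) none)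
    else "computed_unknown"
  else "composed"

def hom_sets_isomorphic_py_alt (hom1 : List String) (hom2 : List String) : Bool :=
  PySem.List.sorted (hom1.map pvClassify) (fun x => x) == PySem.List.sorted (hom2.map pvClassify) (fun x => x)

-- ===== PRECONDITION & SPEC =====
def Spec_hom_sets_isomorphic_py (hom1 : List String) (hom2 : List String) (out : Bool) : Prop := out = hom_sets_isomorphic_py_alt hom1 hom2
instance (hom1 : List String) (hom2 : List String) (out : Bool) : Decidable (Spec_hom_sets_isomorphic_py hom1 hom2 out) := by unfold Spec_hom_sets_isomorphic_py; infer_instance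

-- ===== CLAIM (what is proved, stated in full; the proofs are below) =====
def Claim_equal_hom_sets_isomorphic_py : Prop := ∀ (hom1 : List String) (hom2 : List String), Dom_hom_sets_isomorphic_py hom1 hom2 → Spec_hom_sets_isomorphic_py hom1 hom2 (hom_sets_isomorphic_py hom1 hom2)

-- ===== LEMMAS AND PROOFS =====

-- A's loop body increments exactly the key B's classify computes
theorem pvClassifyMorphisms_eq_counter (homSet : List String) :
    pvClassifyMorphisms homSet = PySem.Dict.counter (homSet.map pvClassify) := by
  rw [PySem.Dict.counter_eq_foldl, List.foldl_map]
  unfold pvClassifyMorphisms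
  apply PySem.List.foldl_congr_mem
  intro acc m _
  unfold pvClassify
  split_ifs <;> first | rfl | (dsimp only; split <;> rfl)

-- Python dict equality of two Counters is multiset equality of the underlying lists
theorem pvPyDictEq_counter_iff (l1 l2 : List String) :
    pvPyDictEq (PySem.Dict.counter l1) (PySem.Dict.counter l2) = true ↔ l1.Perm l2 := by
  unfold pvPyDictEq
  rw [Bool.and_eq_true, beq_iff_eq, List.all_eq_true]
  constructor
  · rintro ⟨hsize, hitems⟩
    rw [List.perm_iff_count]
    intro v
    by_cases hv : v ∈ l1
    · have hmem : (v, (l1.count v : Int)) ∈ (PySem.Dict.counter l1).items := by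
        rw [PySem.Dict.items_counter]
        exact List.mem_map.mpr ⟨v, (PySem.Set.mem_ofList l1 v).mpr hv, rfl⟩
      have h := hitems _ hmem
      dsimp only at h
      rw [beq_iff_eq] at h
      have := PySem.Dict.getD_of_get?_eq_some (PySem.Dict.counter l2) (0 : Int) h
      rw [PySem.Dict.getD_counter] at this
      exact_mod_cast this.symm
    · -- v ∉ l1; show v ∉ l2 via the key sets
      have hsub : (PySem.Dict.counter l1).keys ⊆ (PySem.Dict.counter l2).keys := by
        intro k hk
        rw [PySem.Dict.keys_counter, PySem.Set.mem_ofList] at hk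
        have hmem : (k, (l1.count k : Int)) ∈ (PySem.Dict.counter l1).items := by
          rw [PySem.Dict.items_counter]
          exact List.mem_map.mpr ⟨k, (PySem.Set.mem_ofList l1 k).mpr hk, rfl⟩
        have h := hitems _ hmem
        dsimp only at h
        rw [beq_iff_eq] at h
        have hc : (PySem.Dict.counter l2).contains k = true := by
          rw [PySem.Dict.contains_eq_isSome_get?, h]; rfl
        rw [PySem.Dict.contains_counter] at hc
        rw [PySem.Dict.keys_counter, PySem.Set.mem_ofList]
        exact List.contains_iff_mem.mp hc
      have hlen : (PySem.Dict.counter l2).keys.length ≤ (PySem.Dict.counter l1).keys.length := by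
        have h1 : (PySem.Dict.counter l1).size = (PySem.Dict.counter l1).keys.length := by
          simp [PySem.Dict.size, PySem.Dict.keys]
        have h2 : (PySem.Dict.counter l2).size = (PySem.Dict.counter l2).keys.length := by
          simp [PySem.Dict.size, PySem.Dict.keys]
        omega
      have hnd1 : (PySem.Dict.counter l1).keys.Nodup := by
        rw [PySem.Dict.keys_counter]; exact PySem.Set.nodup_ofList l1
      have hperm : (PySem.Dict.counter l1).keys.Perm (PySem.Dict.counter l2).keys :=
        (hnd1.subperm hsub).perm_of_length_le hlen
      have hv2 : v ∉ l2 := by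
        intro hv2
        apply hv
        have : v ∈ (PySem.Dict.counter l2).keys := by
          rw [PySem.Dict.keys_counter, PySem.Set.mem_ofList]; exact hv2
        have := hperm.mem_iff.mpr this
        rw [PySem.Dict.keys_counter, PySem.Set.mem_ofList] at this
        exact this
      rw [List.count_eq_zero_of_not_mem hv, List.count_eq_zero_of_not_mem hv2]
  · intro hperm
    have hkeys : (PySem.Set.ofList l1).Perm (PySem.Set.ofList l2) := by
      apply (List.perm_ext_iff_of_nodup (PySem.Set.nodup_ofList l1) (PySem.Set.nodup_ofList l2)).mpr
      intro a
      rw [PySem.Set.mem_ofList, PySem.Set.mem_ofList]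
      exact ⟨fun h => hperm.mem_iff.mp h, fun h => hperm.mem_iff.mpr h⟩
    refine ⟨?_, ?_⟩
    · simp only [PySem.Dict.size, PySem.Dict.items_counter, List.length_map]
      exact hkeys.length_eq
    · intro p hp
      rw [PySem.Dict.items_counter, List.mem_map] at hp
      obtain ⟨k, hk, rfl⟩ := hp
      rw [PySem.Set.mem_ofList] at hk
      have hk2 : (PySem.Dict.counter l2).contains k = true := by
        rw [PySem.Dict.contains_counter]
        exact List.contains_iff_mem.mpr (hperm.mem_iff.mp hk)
      rw [PySem.Dict.contains_eq_isSome_get?] at hk2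
      obtain ⟨w, hw⟩ := Option.isSome_iff_exists.mp hk2
      have := PySem.Dict.getD_of_get?_eq_some (PySem.Dict.counter l2) (0 : Int) hw
      rw [PySem.Dict.getD_counter] at this
      dsimp only
      rw [hw, beq_iff_eq, ← this, hperm.count_eq]

-- B as a Prop: B is true iff the label lists are permutations of each other
theorem alt_eq_true_iff (hom1 hom2 : List String) :
    hom_sets_isomorphic_py_alt hom1 hom2 = true ↔ (hom1.map pvClassify).Perm (hom2.map pvClassify) := by
  unfold hom_sets_isomorphic_py_alt
  rw [beq_iff_eq]
  exact PySem.List.sorted_id_eq_sorted_id_iff_perm _ _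

theorem hom_sets_isomorphic_py_spec : Claim_equal_hom_sets_isomorphic_py := by
  intro hom1 hom2 _
  unfold Spec_hom_sets_isomorphic_py
  unfold hom_sets_isomorphic_py
  split_ifs with hlen hid
  · -- lengths differ: B cannot be true (a permutation preserves length)
    symm
    rw [Bool.eq_false_iff]
    intro hB
    exact hlen (by
      have := (alt_eq_true_iff hom1 hom2).mp hB
      have := this.length_eq
      simpa using this)
  · -- both sets equal {"id"}: every label is "identity" and the lengths agree, so B is true
    rw [Bool.and_eq_true] at hid
    obtain ⟨h1, h2⟩ := hid
    rw [PySem.Set.equal_iff] at h1 h2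
    symm
    rw [alt_eq_true_iff]
    have e1 : hom1.map pvClassify = List.replicate hom1.length "identity" := by
      rw [List.eq_replicate_iff]
      refine ⟨by simp, ?_⟩
      intro b hb
      rw [List.mem_map] at hb
      obtain ⟨m, hm, rfl⟩ := hb
      have : m = "id" := by
        have := (h1 m).mp hm
        simpa using this
      rw [this]; rfl
    have e2 : hom2.map pvClassify = List.replicate hom2.length "identity" := by
      rw [List.eq_replicate_iff]
      refine ⟨by simp, ?_⟩
      intro b hb
      rw [List.mem_map] at hb
      obtain ⟨m, hm, rfl⟩ := hb
      have : m = "id" := by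
        have := (h2 m).mp hm
        simpa using this
      rw [this]; rfl
    have hlen' : hom1.length = hom2.length := by omega
    rw [e1, e2, hlen']
  · -- general case: Counter equality ↔ label-multiset equality ↔ sorted label lists equal
    rw [pvClassifyMorphisms_eq_counter, pvClassifyMorphisms_eq_counter]
    cases hB : hom_sets_isomorphic_py_alt hom1 hom2
    · rw [Bool.eq_false_iff]
      intro hA
      have := (pvPyDictEq_counter_iff _ _).mp hA
      rw [← alt_eq_true_iff] at this
      rw [this] at hB; cases hB
    · exact (pvPyDictEq_counter_iff _ _).mpr ((alt_eq_true_iff hom1 hom2).mp hB)
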